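-- pv_equiv track=rewrite | github.com/lulf87/pdf-report-checker | python_backend/services/ocr_service.py | _correct_ocr_confusion
-- ===== SOURCE A (Python) =====
-- def _correct_ocr_confusion(value: str) -> str:
--     """
--     校正OCR易混淆字符
--     解决数字和字母的混淆问题，如0/O、1/l/I等
--     """
--     if not value:
--         return value
--
--     # 对于型号字段，应用特定的校正规则
--     # 1. 在数字位置（通常是型号的最后几位）将O/o替换为0
--     # 型号格式通常是：XXX-XXX-XXXX（最后部分是数字）
--
--     parts = value.split('-')
--     if len(parts) >= 2:
--         # 处理最后一部分（通常是纯数字或数字+字母组合）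
--         last_part = parts[-1]
--
--         # 在最后一部分中，将可能是数字位置的O/o替换为0
--         # 策略：如果O/o后面跟着数字，或者前面是字母且整体长度较短，则可能是0
--         corrected_last = []
--         for i, char in enumerate(last_part):
--             if char.upper() == 'O':
--                 # 判断是否应该替换为0
--                 # 规则1：如果O在数字中间或末尾，且前后都是数字
--                 # 规则2：如果O在短字符串中（如PCO1 -> PC01）
--                 should_be_zero = False
--
--                 # 检查上下文
--                 prev_is_digit = i > 0 and last_part[i-1].isdigit()
--                 next_is_digit = i < len(last_part) - 1 and last_part[i+1].isdigit()
--
--                 if prev_is_digit or next_is_digit: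
--                     should_be_zero = True
--                 elif len(last_part) <= 4:
--                     # 短代码中，O很可能是0
--                     should_be_zero = True
--
--                 if should_be_zero:
--                     corrected_last.append('0')
--                 else:
--                     corrected_last.append(char)
--             else:
--                 corrected_last.append(char)
--
--         parts[-1] = ''.join(corrected_last)
--         value = '-'.join(parts)
--
--     return value
-- ===== SOURCE B (Python) =====
-- def _correct_ocr_confusion(value: str) -> str:
--     """O/0 OCR correction on the last '-'-separated part, via a digit-adjacency index."""
--     parts = value.split('-')
--     if len(parts) < 2:
--         return value
--     last = parts[-1]
--     if len(last) <= 4: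
--         # Short code: every O/o is a misread 0.
--         parts[-1] = last.translate(str.maketrans('Oo', '00'))
--     else:
--         # Stage 1: each digit marks its neighbour positions in a set, built once.
--         near_digit = {j for i, c in enumerate(last) if c.isdigit() for j in (i - 1, i + 1)}
--         # Stage 2: replace an O/o only where the index says a digit is adjacent.
--         parts[-1] = ''.join('0' if i in near_digit and c in 'Oo' else c
--                             for i, c in enumerate(last))
--     return '-'.join(parts)
-- ===== Notes on version B (the rewrite author's own statement) =====
-- stated objective: alternative
-- what changed: A decides each O/o by inspecting its neighbors with index arithmetic inside one loop; B instead builds a digit-adjacency index once (each digit marks positions i-1 and i+1 in a set) and then does a pass that only looks the position up in that index, with short codes handled up front by a translate-table map of every O/o to 0.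
import Mathlib
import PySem

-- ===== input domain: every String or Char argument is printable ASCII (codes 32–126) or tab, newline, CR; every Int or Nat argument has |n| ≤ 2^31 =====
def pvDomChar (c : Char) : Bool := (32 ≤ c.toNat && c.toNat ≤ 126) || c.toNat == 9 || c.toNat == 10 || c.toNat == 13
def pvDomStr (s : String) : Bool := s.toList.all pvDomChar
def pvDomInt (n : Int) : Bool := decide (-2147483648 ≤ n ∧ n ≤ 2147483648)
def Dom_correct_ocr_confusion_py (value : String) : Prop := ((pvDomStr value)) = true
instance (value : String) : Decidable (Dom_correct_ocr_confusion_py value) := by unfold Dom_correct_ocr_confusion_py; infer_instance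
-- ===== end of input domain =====

-- B replaces A's per-character neighbor inspection by a digit-adjacency index built first
-- (each digit marks its neighbor positions in a set) plus a translate-style map for short codes
-- (objective: alternative, same cost).


-- ===== PORT A =====
-- literal transliteration of _correct_ocr_confusion: split on '-', indexed loop over the
-- last part appending '0' or the char, rejoin.
def correct_ocr_confusion_py (value : String) : String :=
  let l := value.toList
  if l = [] then value
  else
    let parts := PySem.Chars.splitOn l ['-']
    if 2 ≤ parts.length then
      let last_part := PySem.List.pyGetD parts (-1) []
      let corrected_last := (PySem.List.enumerate last_part 0).foldl
        (fun acc p =>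
          if PySem.Chars.upperChar p.2 = 'O' then
            let prev_is_digit := decide (0 < p.1) &&
              PySem.Chars.isdigit (PySem.List.pyGetD last_part (p.1 - 1) ' ')
            let next_is_digit := decide (p.1 < (last_part.length : Int) - 1) &&
              PySem.Chars.isdigit (PySem.List.pyGetD last_part (p.1 + 1) ' ')
            let should_be_zero := prev_is_digit || next_is_digit ||
              decide (last_part.length ≤ 4)
            if should_be_zero then acc ++ ['0'] else acc ++ [p.2]
          else acc ++ [p.2]) []
      String.ofList (PySem.Chars.join ['-'] (parts.dropLast ++ [corrected_last]))
    else value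

-- ===== PORT B =====
-- stage 1 of B's long branch: the set comprehension building the digit-adjacency index
-- {j for i, c in enumerate(last) if c.isdigit() for j in (i-1, i+1)} (order irrelevant: only membership is used).
def pvNearDigit (cs : List Char) : PySem.Set Int :=
  (PySem.List.enumerate cs 0).foldl
    (fun s p => if PySem.Chars.isdigit p.2 then
        PySem.Set.add (PySem.Set.add s (p.1 - 1)) (p.1 + 1)
      else s)
    PySem.Set.empty

def pvAltFix (cs : List Char) : List Char :=
  if cs.length ≤ 4 then
    -- last.translate(str.maketrans('Oo', '00')): a per-character table map, exact
    cs.map (fun c => if c == 'O' || c == 'o' then '0' else c)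
  else
    let near := pvNearDigit cs
    -- stage 2: one pass consulting only the index
    (PySem.List.enumerate cs 0).map (fun p =>
      if PySem.Set.contains near p.1 && (p.2 == 'O' || p.2 == 'o') then '0' else p.2)

def correct_ocr_confusion_py_alt (value : String) : String :=
  let parts := PySem.Chars.splitOn value.toList ['-']
  if parts.length < 2 then value
  else
    let last := PySem.List.pyGetD parts (-1) []
    String.ofList (PySem.Chars.join ['-'] (parts.dropLast ++ [pvAltFix last]))

-- ===== PRECONDITION & SPEC =====
def Spec_correct_ocr_confusion_py (value : String) (out : String) : Prop := out = correct_ocr_confusion_py_alt value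
instance (value : String) (out : String) : Decidable (Spec_correct_ocr_confusion_py value out) := by unfold Spec_correct_ocr_confusion_py; infer_instance

-- ===== CLAIM (what is proved, stated in full; the proofs are below) =====
def Claim_equal_correct_ocr_confusion_py : Prop := ∀ (value : String), Dom_correct_ocr_confusion_py value → Spec_correct_ocr_confusion_py value (correct_ocr_confusion_py value)

-- ===== LEMMAS AND PROOFS =====

-- A's per-character rule, as a function of the original last part and the (index, char) pair.
def pvRuleA (cs : List Char) (p : Int × Char) : Char :=
  if PySem.Chars.upperChar p.2 = 'O' then
    if (decide (0 < p.1) && PySem.Chars.isdigit (PySem.List.pyGetD cs (p.1 - 1) ' ')) ||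
       (decide (p.1 < (cs.length : Int) - 1) && PySem.Chars.isdigit (PySem.List.pyGetD cs (p.1 + 1) ' ')) ||
       decide (cs.length ≤ 4)
    then '0' else p.2
  else p.2

theorem pvUpperEq (c : Char) : (PySem.Chars.upperChar c = 'O') ↔ (c = 'O' ∨ c = 'o') := by
  by_cases ho : c = 'O'
  · subst ho; decide
  by_cases ho2 : c = 'o'
  · subst ho2; decide
  constructor
  · intro he
    exfalso
    unfold PySem.Chars.upperChar at he
    by_cases h : PySem.Chars.islower c = true
    · rw [if_pos h] at he
      have h1 : 97 ≤ c.toNat ∧ c.toNat ≤ 122 := by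
        unfold PySem.Chars.islower at h
        simp only [Bool.and_eq_true, decide_eq_true_eq, Char.le_def,
          UInt32.le_iff_toNat_le] at h
        exact h
      have hval : (c.toNat - 32).isValidChar := Or.inl (by omega)
      have htn := congrArg Char.toNat he
      rw [Char.toNat_ofNat, if_pos hval] at htn
      have h79 : ('O').toNat = 79 := rfl
      rw [h79] at htn
      have h111 : c.toNat = 111 := by omega
      have hc := Char.ofNat_toNat c
      rw [h111] at hc
      have ho' : Char.ofNat 111 = 'o' := by decide
      exact ho2 (hc.symm.trans ho')
    · rw [if_neg h] at he
      exact ho he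
  · rintro (h | h)
    · exact absurd h ho
    · exact absurd h ho2

theorem pvFoldA_eq_map (cs : List Char) :
    ((PySem.List.enumerate cs 0).foldl
      (fun acc p =>
        if PySem.Chars.upperChar p.2 = 'O' then
          let prev_is_digit := decide (0 < p.1) &&
            PySem.Chars.isdigit (PySem.List.pyGetD cs (p.1 - 1) ' ')
          let next_is_digit := decide (p.1 < (cs.length : Int) - 1) &&
            PySem.Chars.isdigit (PySem.List.pyGetD cs (p.1 + 1) ' ')
          let should_be_zero := prev_is_digit || next_is_digit ||
            decide (cs.length ≤ 4)
          if should_be_zero then acc ++ ['0'] else acc ++ [p.2]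
        else acc ++ [p.2]) ([] : List Char))
    = (PySem.List.enumerate cs 0).map (pvRuleA cs) := by
  have hbody : (fun (acc : List Char) (p : Int × Char) =>
      if PySem.Chars.upperChar p.2 = 'O' then
        let prev_is_digit := decide (0 < p.1) &&
          PySem.Chars.isdigit (PySem.List.pyGetD cs (p.1 - 1) ' ')
        let next_is_digit := decide (p.1 < (cs.length : Int) - 1) &&
          PySem.Chars.isdigit (PySem.List.pyGetD cs (p.1 + 1) ' ')
        let should_be_zero := prev_is_digit || next_is_digit ||
          decide (cs.length ≤ 4)
        if should_be_zero then acc ++ ['0'] else acc ++ [p.2]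
      else acc ++ [p.2])
      = (fun acc p => acc ++ [pvRuleA cs p]) := by
    funext acc p
    simp only [pvRuleA]
    split_ifs <;> rfl
  rw [hbody, PySem.List.foldl_append_singleton_eq_map]
  simp

-- membership in the fold that builds the digit-adjacency index
theorem pvFoldAdd_mem (l : List (Int × Char)) (init : PySem.Set Int) (x : Int) :
    x ∈ l.foldl
      (fun s p => if PySem.Chars.isdigit p.2 then
          PySem.Set.add (PySem.Set.add s (p.1 - 1)) (p.1 + 1)
        else s) init
    ↔ x ∈ init ∨ ∃ p ∈ l, PySem.Chars.isdigit p.2 ∧ (x = p.1 - 1 ∨ x = p.1 + 1) := by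
  induction l generalizing init with
  | nil => simp
  | cons hd tl ih =>
    simp only [List.foldl_cons]
    by_cases hd2 : PySem.Chars.isdigit hd.2 = true
    · rw [if_pos hd2, ih]
      simp only [PySem.Set.mem_add, List.mem_cons]
      constructor
      · rintro ((( h | h) | h) | ⟨p, hp, h1, h2⟩)
        · exact Or.inl h
        · exact Or.inr ⟨hd, Or.inl rfl, hd2, Or.inl h⟩
        · exact Or.inr ⟨hd, Or.inl rfl, hd2, Or.inr h⟩
        · exact Or.inr ⟨p, Or.inr hp, h1, h2⟩
      · rintro (h | ⟨p, hp | hp, h1, h2⟩)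
        · exact Or.inl (Or.inl (Or.inl h))
        · subst hp
          rcases h2 with h2 | h2
          · exact Or.inl (Or.inl (Or.inr h2))
          · exact Or.inl (Or.inr h2)
        · exact Or.inr ⟨p, hp, h1, h2⟩
    · rw [if_neg hd2, ih]
      constructor
      · rintro (h | ⟨p, hp, h1, h2⟩)
        · exact Or.inl h
        · exact Or.inr ⟨p, List.mem_cons_of_mem _ hp, h1, h2⟩
      · rintro (h | ⟨p, hp, h1, h2⟩)
        · exact Or.inl h
        · rcases List.mem_cons.mp hp with hp | hp
          · subst hp; exact absurd h1 hd2
          · exact Or.inr ⟨p, hp, h1, h2⟩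

-- the index holds exactly the positions with a digit neighbour in the original string
theorem pvNear_mem (cs : List Char) (x : Int) :
    x ∈ pvNearDigit cs ↔
      ∃ j : Nat, ∃ hj : j < cs.length,
        PySem.Chars.isdigit (cs[j]'hj) = true ∧ (x = (j : Int) - 1 ∨ x = (j : Int) + 1) := by
  unfold pvNearDigit
  rw [pvFoldAdd_mem]
  simp only [PySem.Set.empty, List.not_mem_nil, false_or]
  constructor
  · rintro ⟨p, hp, h1, h2⟩
    rcases List.mem_iff_getElem.mp hp with ⟨k, hk, hpk⟩
    have hk' : k < cs.length := by simpa [PySem.List.length_enumerate] using hk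
    rw [PySem.List.getElem_enumerate] at hpk
    refine ⟨k, hk', ?_, ?_⟩
    · rw [← hpk] at h1; simpa using h1
    · rw [← hpk] at h2; simpa using h2
  · rintro ⟨j, hj, h1, h2⟩
    refine ⟨((j : Int), cs[j]'hj), ?_, h1, h2⟩
    rw [List.mem_iff_getElem]
    refine ⟨j, by simpa [PySem.List.length_enumerate] using hj, ?_⟩
    rw [PySem.List.getElem_enumerate]
    simp

-- A's neighbour test at position k equals B's index lookup
theorem pvMaskChar (cs : List Char) (k : Nat) (hk : k < cs.length) :
    ((decide (0 < (k : Int)) && PySem.Chars.isdigit (PySem.List.pyGetD cs ((k : Int) - 1) ' ')) ||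
     (decide ((k : Int) < (cs.length : Int) - 1) && PySem.Chars.isdigit (PySem.List.pyGetD cs ((k : Int) + 1) ' ')))
    = PySem.Set.contains (pvNearDigit cs) (k : Int) := by
  have hcont : PySem.Set.contains (pvNearDigit cs) (k : Int) = true ↔ (k : Int) ∈ pvNearDigit cs := by
    simp [PySem.Set.contains]
  rw [Bool.eq_iff_iff, hcont, pvNear_mem]
  constructor
  · rintro h
    rcases Bool.or_eq_true _ _ |>.mp h with h | h
    · rw [Bool.and_eq_true, decide_eq_true_eq] at h
      obtain ⟨hpos, hdig⟩ := h
      have hk0 : 1 ≤ k := by exact_mod_cast hpos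
      have hcast : (k : Int) - 1 = ((k - 1 : Nat) : Int) := by push_cast [hk0]; ring
      rw [hcast, PySem.List.pyGetD_natCast, List.getD_eq_getElem _ _ (by omega)] at hdig
      exact ⟨k - 1, by omega, hdig, Or.inr (by push_cast [hk0]; ring)⟩
    · rw [Bool.and_eq_true, decide_eq_true_eq] at h
      obtain ⟨hlt, hdig⟩ := h
      have hk1 : k + 1 < cs.length := by omega
      have hcast : (k : Int) + 1 = ((k + 1 : Nat) : Int) := by push_cast; ring
      rw [hcast, PySem.List.pyGetD_natCast, List.getD_eq_getElem _ _ hk1] at hdig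
      exact ⟨k + 1, hk1, hdig, Or.inl (by push_cast; ring)⟩
  · rintro ⟨j, hj, hdig, hx | hx⟩
    · -- k = j - 1, so the next char is the digit at j = k + 1
      have hjk : j = k + 1 := by omega
      subst hjk
      apply Bool.or_eq_true _ _ |>.mpr
      right
      rw [Bool.and_eq_true, decide_eq_true_eq]
      refine ⟨by exact_mod_cast (by omega : (k : Int) < (cs.length : Int) - 1), ?_⟩
      have hcast : (k : Int) + 1 = ((k + 1 : Nat) : Int) := by push_cast; ring
      rw [hcast, PySem.List.pyGetD_natCast, List.getD_eq_getElem _ _ hj]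
      exact hdig
    · -- k = j + 1, so the previous char is the digit at j = k - 1
      have hjk : j = k - 1 ∧ 1 ≤ k := by omega
      obtain ⟨hjk, hk0⟩ := hjk
      subst hjk
      apply Bool.or_eq_true _ _ |>.mpr
      left
      rw [Bool.and_eq_true, decide_eq_true_eq]
      refine ⟨by exact_mod_cast (by omega : (0 : Int) < (k : Int)), ?_⟩
      have hcast : (k : Int) - 1 = ((k - 1 : Nat) : Int) := by push_cast [hk0]; ring
      rw [hcast, PySem.List.pyGetD_natCast, List.getD_eq_getElem _ _ hj]
      exact hdig

theorem pvCore (cs : List Char) :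
    (PySem.List.enumerate cs 0).map (pvRuleA cs) = pvAltFix cs := by
  unfold pvAltFix
  by_cases hshort : cs.length ≤ 4
  · rw [if_pos hshort]
    apply List.ext_getElem
    · simp [PySem.List.length_enumerate]
    · intro k h1 h2
      have hk : k < cs.length := by
        simpa [PySem.List.length_enumerate] using h1
      simp only [List.getElem_map, PySem.List.getElem_enumerate, zero_add]
      unfold pvRuleA
      simp only [decide_eq_true (by exact hshort : cs.length ≤ 4), Bool.or_true]
      by_cases hu : cs[k]'hk = 'O' ∨ cs[k]'hk = 'o'
      · rw [if_pos ((pvUpperEq _).mpr hu)]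
        rcases hu with h | h <;> simp [h]
      · rw [if_neg (fun hx => hu ((pvUpperEq _).mp hx))]
        have hO : cs[k]'hk ≠ 'O' := fun h => hu (Or.inl h)
        have ho : cs[k]'hk ≠ 'o' := fun h => hu (Or.inr h)
        simp [hO, ho]
  · rw [if_neg hshort]
    apply List.ext_getElem
    · simp
    · intro k h1 h2
      have hk : k < cs.length := by
        simpa [PySem.List.length_enumerate] using h1
      simp only [List.getElem_map, PySem.List.getElem_enumerate, zero_add]
      unfold pvRuleA
      simp only [decide_eq_false (by exact hshort : ¬ cs.length ≤ 4), Bool.or_false]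
      rw [pvMaskChar cs k hk]
      by_cases hu : cs[k]'hk = 'O' ∨ cs[k]'hk = 'o'
      · rw [if_pos ((pvUpperEq _).mpr hu)]
        by_cases hd : PySem.Set.contains (pvNearDigit cs) (k : Int) = true
        · rw [if_pos hd, if_pos (by
            rw [Bool.and_eq_true, Bool.or_eq_true, beq_iff_eq, beq_iff_eq]
            exact ⟨hd, hu⟩)]
        · rw [if_neg hd, if_neg (by
            rw [Bool.and_eq_true]
            rintro ⟨h, -⟩
            exact hd h)]
      · rw [if_neg (fun hx => hu ((pvUpperEq _).mp hx)), if_neg (by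
          rw [Bool.and_eq_true, Bool.or_eq_true, beq_iff_eq, beq_iff_eq]
          rintro ⟨-, h⟩
          exact hu h)]

-- ===== VERDICT (by name: the statement is the Claim_ definition above) =====
theorem correct_ocr_confusion_py_spec : Claim_equal_correct_ocr_confusion_py := by
  intro value _
  unfold Spec_correct_ocr_confusion_py correct_ocr_confusion_py correct_ocr_confusion_py_alt
  by_cases hl : value.toList = []
  · have hsplit : PySem.Chars.splitOn ([] : List Char) ['-'] = [[]] := rfl
    simp [hl, hsplit]
  · simp only [hl, if_false]
    by_cases h2 : 2 ≤ (PySem.Chars.splitOn value.toList ['-']).length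
    · have h2' : ¬ (PySem.Chars.splitOn value.toList ['-']).length < 2 := by omega
      simp only [if_pos h2, if_neg h2']
      rw [pvFoldA_eq_map, pvCore]
    · have h2' : (PySem.Chars.splitOn value.toList ['-']).length < 2 := by omega
      simp only [if_neg h2, if_pos h2']
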